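-- pv_equiv track=rewrite | github.com/MJGTwo/adventofcode | 17/py/d4p1.py | validPassphrase
-- ===== SOURCE A (Python) =====
-- def validPassphrase(passphrase):
--     words = set()
--     for word in passphrase:
--         l = len(words)
--         words.add(word)
--         if l == len(words):
--             return False
--     return True
-- ===== SOURCE B (Python) =====
-- def validPassphrase(passphrase):
--     ws = sorted(passphrase)
--     return all(a != b for a, b in zip(ws, ws[1:]))
-- ===== Notes on version B (the rewrite author's own statement) =====
-- stated objective: alternative
-- what changed: Replaced the hash-set growth test with early exit by a sort-then-scan: sort the words and check that no two adjacent words in the sorted list are equal (duplicates are adjacent after sorting).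
import Mathlib
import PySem

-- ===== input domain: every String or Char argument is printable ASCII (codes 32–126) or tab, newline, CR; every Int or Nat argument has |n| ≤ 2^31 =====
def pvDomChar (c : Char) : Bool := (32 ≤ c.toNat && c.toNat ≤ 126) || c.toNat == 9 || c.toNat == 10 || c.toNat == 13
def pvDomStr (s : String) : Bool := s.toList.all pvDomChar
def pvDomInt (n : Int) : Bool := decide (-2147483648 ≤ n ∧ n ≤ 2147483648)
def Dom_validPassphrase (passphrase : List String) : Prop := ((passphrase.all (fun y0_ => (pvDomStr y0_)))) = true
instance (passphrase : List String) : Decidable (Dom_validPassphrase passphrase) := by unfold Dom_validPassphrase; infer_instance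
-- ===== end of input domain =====

-- B sorts the words and scans for equal adjacent pairs (duplicates are adjacent after sorting),
-- instead of A's hash-set growth test with early exit.

-- ===== PORT A =====
-- the 'for word in passphrase' loop carrying the set 'words', with its early 'return False'
def validPassphraseGo (words : PySem.Set String) : List String → Bool
  | [] => true
  | word :: rest =>
      let l := PySem.Set.len words
      let words' := PySem.Set.add words word
      if l == PySem.Set.len words' then false else validPassphraseGo words' rest

def validPassphrase (passphrase : List String) : Bool :=
  validPassphraseGo PySem.Set.empty passphrase

-- ===== PORT B =====
-- ws = sorted(passphrase); all(a != b for a, b in zip(ws, ws[1:]))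
def validPassphrase_alt (passphrase : List String) : Bool :=
  let ws := PySem.List.sorted passphrase (fun x => x) false
  (ws.zip (PySem.List.slice ws (some 1) none)).all (fun p => p.1 != p.2)

-- ===== PRECONDITION & SPEC =====
def Spec_validPassphrase (passphrase : List String) (out : Bool) : Prop := out = validPassphrase_alt passphrase
instance (passphrase : List String) (out : Bool) : Decidable (Spec_validPassphrase passphrase out) := by unfold Spec_validPassphrase; infer_instance

-- ===== CLAIM (what is proved, stated in full; the proofs are below) =====
def Claim_equal_validPassphrase : Prop := ∀ (passphrase : List String), Dom_validPassphrase passphrase → Spec_validPassphrase passphrase (validPassphrase passphrase)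

-- ===== LEMMAS AND PROOFS =====

-- A's loop returns true iff the remaining words are distinct and none was seen already
theorem goA_eq (l : List String) : ∀ (s : PySem.Set String),
    validPassphraseGo s l = decide (l.Nodup ∧ ∀ w ∈ l, w ∉ s) := by
  induction l with
  | nil => intro s; simp [validPassphraseGo]
  | cons w rest ih =>
      intro s
      by_cases hw : w ∈ s
      · have hf : validPassphraseGo s (w :: rest) = false := by
          simp [validPassphraseGo, PySem.Set.add_of_mem hw]
        rw [hf, eq_comm, decide_eq_false_iff_not]
        rintro ⟨-, h⟩
        exact h w (by simp) hw
      · have hne : PySem.Set.len s ≠ PySem.Set.len (PySem.Set.add s w) := by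
          simp [PySem.Set.add_of_not_mem hw, PySem.Set.len]
        simp only [validPassphraseGo]
        rw [if_neg (by simpa using hne), ih, decide_eq_decide]
        simp only [List.nodup_cons, List.mem_cons, PySem.Set.mem_add]
        constructor
        · rintro ⟨h1, h2⟩
          have hwr : w ∉ rest := fun hm => (h2 w hm) (Or.inr rfl)
          exact ⟨⟨hwr, h1⟩, fun v hv => hv.elim (fun he => he ▸ hw) (fun hv => fun hs => h2 v hv (Or.inl hs))⟩
        · rintro ⟨⟨h1, h2⟩, h3⟩
          refine ⟨h2, fun v hv hm => hm.elim (fun hs => h3 v (Or.inr hv) hs) (fun he => h1 (he ▸ hv))⟩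

-- on a ≤-sorted list, no equal adjacent pair ↔ no duplicates at all
theorem adj_eq_nodup : ∀ (ws : List String), ws.Pairwise (· ≤ ·) →
    ((ws.zip ws.tail).all (fun p => p.1 != p.2)) = decide ws.Nodup := by
  intro ws
  induction ws with
  | nil => intro _; simp
  | cons a t ih =>
      intro hp
      cases t with
      | nil => simp
      | cons b u =>
          have hp' : (b :: u).Pairwise (· ≤ ·) := hp.tail
          have hab : a ≤ b := (List.pairwise_cons.mp hp).1 b (by simp)
          have hle : ∀ x ∈ b :: u, a ≤ x := (List.pairwise_cons.mp hp).1
          have ih' := ih hp'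
          simp only [List.tail_cons] at ih'
          simp only [List.tail_cons, List.zip_cons_cons, List.all_cons]
          rw [ih']
          by_cases he : a = b
          · subst he
            simp
          · have hane : (a != b) = true := by simpa using he
            rw [hane, Bool.true_and, decide_eq_decide]
            constructor
            · intro hnd
              refine List.nodup_cons.mpr ⟨?_, hnd⟩
              intro hmem
              rcases List.mem_cons.mp hmem with h1 | h2
              · exact he h1
              · -- a ∈ u, but a ≤ b ≤ every element of u and a ≠ b
                have hbu : ∀ x ∈ u, b ≤ x := (List.pairwise_cons.mp hp').1
                have hba : b ≤ a := hbu a h2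
                exact he (le_antisymm hab hba)
            · intro hnd; exact hnd.tail

theorem slice_one_tail (ws : List String) :
    PySem.List.slice ws (some 1) none = ws.tail := by
  have := PySem.List.slice_from_natCast (xs := ws) (a := 1)
  simpa [List.drop_one] using this

theorem alt_eq_nodup (l : List String) : validPassphrase_alt l = decide l.Nodup := by
  show ((PySem.List.sorted l (fun x => x) false).zip
      (PySem.List.slice (PySem.List.sorted l (fun x => x) false) (some 1) none)).all
      (fun p => p.1 != p.2) = decide l.Nodup
  have hperm : (PySem.List.sorted l (fun x => x) false).Perm l := PySem.List.sorted_perm l _ _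
  rw [slice_one_tail, adj_eq_nodup _ (by simpa using PySem.List.sorted_pairwise l (fun x => x))]
  simp [hperm.nodup_iff]

-- ===== VERDICT (by name: the statement is the Claim_ definition above) =====
theorem validPassphrase_spec : Claim_equal_validPassphrase := by
  intro p _
  show validPassphrase p = validPassphrase_alt p
  rw [validPassphrase, goA_eq, alt_eq_nodup]
  simp
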